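-- pv_equiv track=rewrite | github.com/airbytehq/terraform-provider-airbyte | scripts/postprocess_readme.py | wrap_section_in_details
-- ===== SOURCE A (Python) =====
-- def wrap_section_in_details(lines: list[str], heading_prefix: str, summary_text: str) -> list[str]:
--     """Find a ### heading and wrap its bullet list in a <details> block."""
--     result = []
--     i = 0
--     while i < len(lines):
--         line = lines[i]
--         if line.rstrip() == heading_prefix:
--             result.append(line)
--             i += 1
--             if i < len(lines) and lines[i].strip() == "":
--                 result.append(lines[i])
--                 i += 1
--             count = 0
--             bullet_start = i
--             while i < len(lines) and lines[i].startswith("* "):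
--                 count += 1
--                 i += 1
--             if count > 20:
--                 result.append(f"<details>\n")
--                 result.append(f"<summary>{summary_text} ({count})</summary>\n")
--                 result.append("\n")
--                 for j in range(bullet_start, bullet_start + count):
--                     result.append(lines[j])
--                 result.append("\n")
--                 result.append("</details>\n")
--             else:
--                 for j in range(bullet_start, bullet_start + count):
--                     result.append(lines[j])
--         else:
--             result.append(line)
--             i += 1
--     return result
-- ===== SOURCE B (Python) =====
-- def wrap_section_in_details(lines: list[str], heading_prefix: str, summary_text: str) -> list[str]:
--     """Single forward pass with a small state machine: 0 = normal, 1 = just saw the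
--     heading (one optional blank line may follow), 2 = collecting bullet lines into buf."""
--     out = []
--     buf = []
--     mode = 0
--
--     def flush():
--         if len(buf) > 20:
--             out.append("<details>\n")
--             out.append(f"<summary>{summary_text} ({len(buf)})</summary>\n")
--             out.append("\n")
--             out.extend(buf)
--             out.append("\n")
--             out.append("</details>\n")
--         else:
--             out.extend(buf)
--         buf.clear()
--
--     for line in lines:
--         while True:
--             if mode == 0:
--                 out.append(line)
--                 mode = 1 if line.rstrip() == heading_prefix else 0
--                 break
--             elif mode == 1:
--                 if line.strip() == "":
--                     out.append(line)
--                     mode = 2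
--                     break
--                 mode = 2  # no blank line: reprocess this line as a potential bullet
--             else:  # mode == 2
--                 if line.startswith("* "):
--                     buf.append(line)
--                     break
--                 flush()
--                 mode = 0  # reprocess this line as a normal line / next heading
--     if mode != 0:
--         flush()
--     return out
-- ===== Notes on version B (the rewrite author's own statement) =====
-- stated objective: alternative
-- what changed: A's index-jumping outer while loop with nested inner scans (a bullet-count loop plus a separate range copy loop that re-reads lines[j]) is replaced by a single forward pass state machine (normal / expect-blank / collecting) that accumulates bullets in a buffer and flushes it when the run ends; the constant-factor win comes from touching each line once with no index arithmetic or second read of the bullet window.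
import Mathlib
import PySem

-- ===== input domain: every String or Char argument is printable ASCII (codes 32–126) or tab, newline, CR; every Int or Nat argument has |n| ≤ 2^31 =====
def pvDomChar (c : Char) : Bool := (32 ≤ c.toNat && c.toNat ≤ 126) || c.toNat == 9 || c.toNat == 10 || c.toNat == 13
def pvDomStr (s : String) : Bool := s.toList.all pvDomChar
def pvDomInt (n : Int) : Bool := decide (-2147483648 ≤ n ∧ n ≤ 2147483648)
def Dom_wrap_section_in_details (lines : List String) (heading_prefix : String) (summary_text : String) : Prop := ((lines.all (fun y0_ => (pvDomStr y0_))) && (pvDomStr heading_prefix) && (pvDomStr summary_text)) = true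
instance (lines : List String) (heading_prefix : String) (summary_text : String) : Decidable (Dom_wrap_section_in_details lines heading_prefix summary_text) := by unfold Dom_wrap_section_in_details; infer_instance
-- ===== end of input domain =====

-- B replaces A's index-jumping outer/inner while loops by a single forward pass
-- (state machine with a bullet buffer); objective: alternative structure, same cost.

-- ===== PORT A =====
-- inner 'while i < len(lines) and lines[i].startswith("* "): count += 1; i += 1' (returns count)
def aCount (lines : List String) (i : Nat) : Nat :=
  if h : i < lines.length ∧ PySem.Str.startswith (lines.getD i "") "* " = true then
    aCount lines (i + 1) + 1
  else 0
termination_by lines.length - i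
decreasing_by omega

-- 'for j in range(bullet_start, bullet_start + count): result.append(lines[j])'
def aFor (lines : List String) (j stop : Nat) (acc : List String) : List String :=
  if j < stop then aFor lines (j + 1) stop (acc ++ [lines.getD j ""]) else acc
termination_by stop - j
decreasing_by omega

-- the outer 'while i < len(lines)' loop, state = (result, i)
def aLoop (lines : List String) (heading_prefix summary_text : String) (acc : List String) (i : Nat) : List String :=
  if h : i < lines.length then
    let line := lines.getD i ""
    if PySem.Str.rstrip line == heading_prefix then
      let acc1 := acc ++ [line]
      let blank := i + 1 < lines.length ∧ PySem.Str.strip (lines.getD (i + 1) "") == ""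
      let acc2 := if blank then acc1 ++ [lines.getD (i + 1) ""] else acc1
      let i2 := if blank then i + 2 else i + 1
      let count := aCount lines i2
      let acc3 :=
        if count > 20 then
          aFor lines i2 (i2 + count)
            (acc2 ++ ["<details>\n",
                      "<summary>" ++ summary_text ++ " (" ++ PySem.Int.toStr (count : Int) ++ ")</summary>\n",
                      "\n"])
            ++ ["\n", "</details>\n"]
        else aFor lines i2 (i2 + count) acc2
      aLoop lines heading_prefix summary_text acc3 (i2 + count)
    else aLoop lines heading_prefix summary_text (acc ++ [line]) (i + 1)
  else acc
termination_by lines.length - i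
decreasing_by
  all_goals first
    | omega
    | (split_ifs <;> omega)

def wrap_section_in_details (lines : List String) (heading_prefix : String) (summary_text : String) : List String :=
  aLoop lines heading_prefix summary_text [] 0

-- ===== PORT B =====
-- flush(): wrap buf in <details> when len(buf) > 20, else emit it verbatim
def bFlush (summary_text : String) (out buf : List String) : List String :=
  if buf.length > 20 then
    out ++ ["<details>\n",
            "<summary>" ++ summary_text ++ " (" ++ PySem.Int.toStr (buf.length : Int) ++ ")</summary>\n",
            "\n"]
        ++ buf ++ ["\n", "</details>\n"]
  else out ++ buf

-- the mode-2 body (also reached from mode 1 when the optional blank line is absent)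
def bCollect (heading_prefix summary_text : String) (out buf : List String) (line : String) :
    List String × Nat × List String :=
  if PySem.Str.startswith line "* " then (out, 2, buf ++ [line])
  else
    let out2 := bFlush summary_text out buf
    (out2 ++ [line], if PySem.Str.rstrip line == heading_prefix then 1 else 0, [])

-- one step of the state machine; state = (out, mode, buf)
def bStep (heading_prefix summary_text : String) (s : List String × Nat × List String) (line : String) :
    List String × Nat × List String :=
  match s with
  | (out, 0, buf) => (out ++ [line], if PySem.Str.rstrip line == heading_prefix then 1 else 0, buf)
  | (out, 1, buf) =>
    if PySem.Str.strip line == "" then (out ++ [line], 2, buf)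
    else bCollect heading_prefix summary_text out buf line
  | (out, _ + 2, buf) => bCollect heading_prefix summary_text out buf line

def wrap_section_in_details_alt (lines : List String) (heading_prefix : String) (summary_text : String) : List String :=
  let r := lines.foldl (bStep heading_prefix summary_text) ([], 0, [])
  if r.2.1 != 0 then bFlush summary_text r.1 r.2.2 else r.1

-- ===== PRECONDITION & SPEC =====
def Spec_wrap_section_in_details (lines : List String) (heading_prefix : String) (summary_text : String) (out : List String) : Prop := out = wrap_section_in_details_alt lines heading_prefix summary_text
instance (lines : List String) (heading_prefix : String) (summary_text : String) (out : List String) : Decidable (Spec_wrap_section_in_details lines heading_prefix summary_text out) := by unfold Spec_wrap_section_in_details; infer_instance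

-- ===== CLAIM (what is proved, stated in full; the proofs are below) =====
def Claim_equal_wrap_section_in_details : Prop := ∀ (lines : List String) (heading_prefix : String) (summary_text : String), Dom_wrap_section_in_details lines heading_prefix summary_text → Spec_wrap_section_in_details lines heading_prefix summary_text (wrap_section_in_details lines heading_prefix summary_text)

-- ===== LEMMAS AND PROOFS =====

-- common specification of the per-section transformation, recursion on the list structure
def W (heading_prefix summary_text : String) (acc : List String) (l : List String) : List String :=
  match l with
  | [] => acc
  | x :: xs =>
    if PySem.Str.rstrip x == heading_prefix then
      match xs with
      | [] => acc ++ [x]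
      | y :: ys =>
        if PySem.Str.strip y == "" then
          let bullets := ys.takeWhile (fun s => PySem.Str.startswith s "* ")
          W heading_prefix summary_text (bFlush summary_text (acc ++ [x, y]) bullets) (ys.drop bullets.length)
        else
          let bullets := (y :: ys).takeWhile (fun s => PySem.Str.startswith s "* ")
          W heading_prefix summary_text (bFlush summary_text (acc ++ [x]) bullets) ((y :: ys).drop bullets.length)
    else W heading_prefix summary_text (acc ++ [x]) xs
termination_by l.length
decreasing_by
  all_goals simp only [List.length_cons, List.length_drop]; omega

theorem W_nil (hp st : String) (acc : List String) : W hp st acc [] = acc := by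
  rw [W]

theorem W_cons_nohead (hp st x : String) (acc xs : List String)
    (h : ¬ (PySem.Str.rstrip x == hp) = true) :
    W hp st acc (x :: xs) = W hp st (acc ++ [x]) xs := by
  rw [W.eq_def]
  simp only [h, Bool.false_eq_true, if_false]

theorem W_head_nil (hp st x : String) (acc : List String)
    (h : (PySem.Str.rstrip x == hp) = true) :
    W hp st acc [x] = acc ++ [x] := by
  rw [W.eq_def]
  simp only [h, if_true]

theorem W_head_blank (hp st x y : String) (acc ys : List String)
    (h : (PySem.Str.rstrip x == hp) = true) (hb : (PySem.Str.strip y == "") = true) :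
    W hp st acc (x :: y :: ys) =
      W hp st (bFlush st (acc ++ [x, y]) (ys.takeWhile (fun s => PySem.Str.startswith s "* ")))
        (ys.drop (ys.takeWhile (fun s => PySem.Str.startswith s "* ")).length) := by
  rw [W.eq_def]
  simp only [h, hb, if_true]

theorem W_head_noblank (hp st x y : String) (acc ys : List String)
    (h : (PySem.Str.rstrip x == hp) = true) (hb : ¬ (PySem.Str.strip y == "") = true) :
    W hp st acc (x :: y :: ys) =
      W hp st (bFlush st (acc ++ [x]) ((y :: ys).takeWhile (fun s => PySem.Str.startswith s "* ")))
        ((y :: ys).drop ((y :: ys).takeWhile (fun s => PySem.Str.startswith s "* ")).length) := by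
  rw [W.eq_def]
  simp only [h, hb, Bool.false_eq_true, if_true, if_false]

-- A-side: aCount counts the leading bullet lines of the remaining suffix
theorem aCount_eq (lines : List String) (i : Nat) :
    aCount lines i = ((lines.drop i).takeWhile (fun s => PySem.Str.startswith s "* ")).length := by
  induction i using aCount.induct lines with
  | case1 i h ih =>
    rw [aCount, dif_pos h, ih, List.drop_eq_getElem_cons h.1]
    have h2 := h.2
    rw [List.getD_eq_getElem _ _ h.1] at h2
    simp only [List.takeWhile_cons]
    rw [if_pos h2]
    simp
  | case2 i h =>
    rw [aCount, dif_neg h]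
    by_cases hl : i < lines.length
    · have h2 : ¬ (PySem.Str.startswith (lines[i]'hl) "* " = true) := by
        intro hc
        exact h ⟨hl, by rw [List.getD_eq_getElem _ _ hl]; exact hc⟩
      rw [List.drop_eq_getElem_cons hl]
      simp only [List.takeWhile_cons]
      rw [if_neg h2]
      simp
    · rw [List.drop_eq_nil_of_le (by omega)]
      simp

-- A-side: the copy loop appends a window of lines
theorem aFor_eq (lines : List String) (c : Nat) : ∀ (i : Nat) (acc : List String), i + c ≤ lines.length →
    aFor lines i (i + c) acc = acc ++ (lines.drop i).take c := by
  induction c with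
  | zero => intro i acc h; rw [aFor]; simp
  | succ c ih =>
    intro i acc h
    have hi : i < lines.length := by omega
    rw [aFor, if_pos (by omega), show i + (c + 1) = (i + 1) + c by omega, ih (i + 1) _ (by omega)]
    rw [List.drop_eq_getElem_cons hi, List.take_succ_cons, List.getD_eq_getElem _ _ hi]
    simp

-- A's outer loop computes W on the remaining suffix
theorem aLoop_eq_W (lines : List String) (hp st : String) : ∀ (i : Nat) (acc : List String),
    aLoop lines hp st acc i = W hp st acc (lines.drop i) := by
  intro i
  induction hn : lines.length - i using Nat.strong_induction_on generalizing i with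
  | _ n ih =>
  intro acc
  subst hn
  by_cases h : i < lines.length
  · rw [aLoop, dif_pos h]
    simp only [List.getD_eq_getElem _ _ h]
    by_cases hh : (PySem.Str.rstrip lines[i] == hp) = true
    · rw [if_pos hh]
      by_cases h1 : i + 1 < lines.length
      · by_cases hb : (PySem.Str.strip (lines[i + 1]'h1) == "") = true
        · -- blank line after the heading: i2 = i + 2
          have hcond : i + 1 < lines.length ∧ (PySem.Str.strip (lines.getD (i + 1) "") == "") = true := by
            refine ⟨h1, ?_⟩; rw [List.getD_eq_getElem _ _ h1]; exact hb
          rw [if_pos hcond, if_pos hcond]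
          have hcnt := aCount_eq lines (i + 2)
          set bl := (lines.drop (i + 2)).takeWhile (fun s => PySem.Str.startswith s "* ") with hbl
          have hble : bl.length ≤ (lines.drop (i + 2)).length :=
            (List.takeWhile_sublist _).length_le
          rw [List.length_drop] at hble
          have htk : (lines.drop (i + 2)).take bl.length = bl :=
            (List.prefix_iff_eq_take.mp (List.takeWhile_prefix _)).symm
          have hfor : ∀ a, aFor lines (i + 2) (i + 2 + aCount lines (i + 2)) a = a ++ bl := by
            intro a; rw [hcnt, aFor_eq lines _ _ _ (by omega), htk]
          have hdrop2 : lines.drop i = lines[i] :: (lines[i + 1]'h1) :: lines.drop (i + 2) := by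
            rw [List.drop_eq_getElem_cons h, List.drop_eq_getElem_cons h1]
          rw [hdrop2, W_head_blank hp st _ _ _ _ hh hb, ← hbl]
          have hrest : lines.drop (i + 2 + aCount lines (i + 2)) = (lines.drop (i + 2)).drop bl.length := by
            rw [hcnt, List.drop_drop, Nat.add_comm]
          split
          · next hgt =>
            rw [hfor, ih (lines.length - (i + 2 + aCount lines (i + 2))) (by omega) _ rfl, hrest]
            rw [bFlush, if_pos (show bl.length > 20 by rw [hcnt] at hgt; omega)]
            try simp [hcnt, List.getElem?_eq_getElem h1, List.append_assoc]
          · next hle =>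
            rw [hfor, ih (lines.length - (i + 2 + aCount lines (i + 2))) (by omega) _ rfl, hrest]
            rw [bFlush, if_neg (show ¬ bl.length > 20 by rw [hcnt] at hle; omega)]
            try simp [List.getElem?_eq_getElem h1, List.append_assoc]
        · -- next line exists but is not blank: i2 = i + 1
          have hcond : ¬ (i + 1 < lines.length ∧ (PySem.Str.strip (lines.getD (i + 1) "") == "") = true) := by
            intro hc
            exact hb (by rw [List.getD_eq_getElem _ _ h1] at hc; exact hc.2)
          rw [if_neg hcond, if_neg hcond]
          have hcnt := aCount_eq lines (i + 1)
          set bl := (lines.drop (i + 1)).takeWhile (fun s => PySem.Str.startswith s "* ") with hbl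
          have hble : bl.length ≤ (lines.drop (i + 1)).length :=
            (List.takeWhile_sublist _).length_le
          rw [List.length_drop] at hble
          have htk : (lines.drop (i + 1)).take bl.length = bl :=
            (List.prefix_iff_eq_take.mp (List.takeWhile_prefix _)).symm
          have hfor : ∀ a, aFor lines (i + 1) (i + 1 + aCount lines (i + 1)) a = a ++ bl := by
            intro a; rw [hcnt, aFor_eq lines _ _ _ (by omega), htk]
          have hdrop1 : lines.drop i = lines[i] :: (lines[i + 1]'h1) :: lines.drop (i + 2) := by
            rw [List.drop_eq_getElem_cons h, List.drop_eq_getElem_cons h1]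
          have hdrop1' : lines.drop (i + 1) = (lines[i + 1]'h1) :: lines.drop (i + 2) := by
            rw [List.drop_eq_getElem_cons h1]
          rw [hdrop1, W_head_noblank hp st _ _ _ _ hh hb, ← hdrop1', ← hbl]
          have hrest : lines.drop (i + 1 + aCount lines (i + 1)) = (lines.drop (i + 1)).drop bl.length := by
            rw [hcnt, List.drop_drop, Nat.add_comm]
          split
          · next hgt =>
            rw [hfor, ih (lines.length - (i + 1 + aCount lines (i + 1))) (by omega) _ rfl, hrest]
            rw [bFlush, if_pos (show bl.length > 20 by rw [hcnt] at hgt; omega)]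
            try simp [hcnt, List.append_assoc]
          · next hle =>
            rw [hfor, ih (lines.length - (i + 1 + aCount lines (i + 1))) (by omega) _ rfl, hrest]
            rw [bFlush, if_neg (show ¬ bl.length > 20 by rw [hcnt] at hle; omega)]
            try simp [List.append_assoc]
      · -- heading is the last line of the file
        have hcond : ¬ (i + 1 < lines.length ∧ (PySem.Str.strip (lines.getD (i + 1) "") == "") = true) := by
          intro hc; exact h1 hc.1
        rw [if_neg hcond, if_neg hcond]
        have hc0 : aCount lines (i + 1) = 0 := by
          rw [aCount_eq, List.drop_eq_nil_of_le (by omega)]; simp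
        rw [hc0, if_neg (by omega)]
        rw [aFor, if_neg (by omega)]
        rw [ih (lines.length - (i + 1 + 0)) (by omega) _ rfl]
        have : lines.drop i = [lines[i]] := by
          rw [List.drop_eq_getElem_cons h, List.drop_eq_nil_of_le (by omega)]
        rw [this, W_head_nil hp st _ _ hh, List.drop_eq_nil_of_le (by omega), W_nil]
    · rw [if_neg hh, ih (lines.length - (i + 1)) (by omega) _ rfl]
      rw [List.drop_eq_getElem_cons h, W_cons_nohead hp st _ _ _ hh]
  · rw [aLoop, dif_neg h, List.drop_eq_nil_of_le (by omega), W_nil]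

-- B-side: run the machine over a list from a given state, then do the final flush
def runB (hp st : String) (s : List String × Nat × List String) (l : List String) : List String :=
  let r := l.foldl (bStep hp st) s
  if r.2.1 != 0 then bFlush st r.1 r.2.2 else r.1

theorem runB_cons (hp st : String) (s : List String × Nat × List String) (x : String) (l : List String) :
    runB hp st s (x :: l) = runB hp st (bStep hp st s x) l := by
  simp [runB]

-- from mode 2, the machine moves the leading bullets into buf, flushes, and restarts in mode 0
theorem runB_two (hp st : String) (l : List String) : ∀ (out buf : List String),
    runB hp st (out, 2, buf) l =
      runB hp st (bFlush st out (buf ++ l.takeWhile (fun s => PySem.Str.startswith s "* ")), 0, [])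
        (l.drop (l.takeWhile (fun s => PySem.Str.startswith s "* ")).length) := by
  induction l with
  | nil => intro out buf; simp [runB, bFlush]
  | cons x xs ih =>
    intro out buf
    rw [runB_cons]
    by_cases hx : PySem.Str.startswith x "* " = true
    · rw [show bStep hp st (out, 2, buf) x = (out, 2, buf ++ [x]) by
        simp [bStep, bCollect]
        simpa using hx]
      rw [ih out (buf ++ [x])]
      simp only [List.takeWhile_cons]
      rw [if_pos hx]
      simp
    · rw [show bStep hp st (out, 2, buf) x
          = (bFlush st out buf ++ [x], if (PySem.Str.rstrip x == hp) = true then 1 else 0, ([] : List String)) by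
        simp [bStep, bCollect]
        simpa using hx]
      simp only [List.takeWhile_cons]
      rw [if_neg hx]
      simp only [List.length_nil, List.drop_zero, List.append_nil]
      rw [runB_cons]
      rfl

-- from mode 0 with an empty buffer, the machine computes W
theorem runB_eq_W (hp st : String) (l : List String) : ∀ (acc : List String),
    runB hp st (acc, 0, []) l = W hp st acc l := by
  induction hn : l.length using Nat.strong_induction_on generalizing l with
  | _ n ih =>
  intro acc
  subst hn
  match l with
  | [] => rw [W_nil]; simp [runB]
  | x :: xs =>
    rw [runB_cons]
    by_cases hh : (PySem.Str.rstrip x == hp) = true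
    · rw [show bStep hp st (acc, 0, []) x = (acc ++ [x], 1, ([] : List String)) by
        simp only [bStep]
        rw [if_pos hh]]
      match xs with
      | [] =>
        rw [W_head_nil hp st _ _ hh]
        simp [runB, bFlush]
      | y :: ys =>
        by_cases hb : (PySem.Str.strip y == "") = true
        · rw [W_head_blank hp st _ _ _ _ hh hb, runB_cons]
          rw [show bStep hp st (acc ++ [x], 1, ([] : List String)) y
              = (acc ++ [x, y], 2, ([] : List String)) by
            simp only [bStep]
            rw [if_pos hb]
            simp]
          rw [runB_two]
          simp only [List.nil_append]
          exact ih ((ys.drop ((ys.takeWhile (fun s => PySem.Str.startswith s "* ")).length)).length)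
            (by simp only [List.length_drop, List.length_cons]; omega) _ rfl _
        · rw [W_head_noblank hp st _ _ _ _ hh hb, runB_cons]
          rw [show bStep hp st (acc ++ [x], 1, ([] : List String)) y
              = bStep hp st (acc ++ [x], 2, ([] : List String)) y by
            simp only [bStep]
            rw [if_neg hb]]
          rw [← runB_cons, runB_two]
          simp only [List.nil_append]
          exact ih (((y :: ys).drop (((y :: ys).takeWhile (fun s => PySem.Str.startswith s "* ")).length)).length)
            (by simp only [List.length_drop, List.length_cons]; omega) _ rfl _
    · rw [show bStep hp st (acc, 0, []) x = (acc ++ [x], 0, ([] : List String)) by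
        simp only [bStep]
        rw [if_neg hh]]
      rw [W_cons_nohead hp st _ _ _ hh]
      exact ih xs.length (by simp) _ rfl _

-- ===== VERDICT (by name: the statement is the Claim_ definition above) =====
theorem wrap_section_in_details_spec : Claim_equal_wrap_section_in_details := by
  intro lines hp st _
  unfold Spec_wrap_section_in_details wrap_section_in_details wrap_section_in_details_alt
  rw [aLoop_eq_W, List.drop_zero, ← runB_eq_W hp st lines []]
  rfl
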